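-- pv_equiv track=rewrite | github.com/Victor-Rodriguez-VR/Coding-challenges | Bigram_Analysis.py | bigram_frequency_analyzer
-- ===== SOURCE A (Python) =====
-- def bigram_frequency_analyzer(text):
--     # Ignores the last character if it is empty.
--     if(text[-1] == " "):
--         text = text[:len(text)-1]
--     theDict = dict()
--     # Seperates words from one another.
--     indivisualWords = text.split(" ")
--     # Since we want 2 words, we increment by two.
--     for index in range(2,len(indivisualWords),1):
--         # The past two words.
--         twoWords = indivisualWords[index-2] + " " + indivisualWords[index-1]
--         currentWord = indivisualWords[index]
--         # Determines if the two words are within the dictionary. Incriments the key's value, or creates a value for the key.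
--         if(theDict.get(twoWords)):
--             if(theDict[twoWords].get(currentWord)):
--                 theDict[twoWords][currentWord]+=1
--             else:
--                 theDict[twoWords][currentWord] = 1
--         else:
--             theDict[twoWords] = { currentWord : 1}
--     # Creates value to contain all words and their associated values.
--     wordsAndNumbers = ""
--     for key in theDict:
--         # Concatonates the starting key with a colon.
--         wordsAndNumbers+= key + " : "
--         # Gathers all values from the first key.
--         nestedDictionary = theDict.get(key)
--         for nestedKey in nestedDictionary:
--             # Concatenates the nested keys with their associated value.
--             wordsAndNumbers+= nestedKey + " ("+str(theDict[key].get(nestedKey)) +") "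
--         wordsAndNumbers+="\n"
--     return wordsAndNumbers
-- ===== SOURCE B (Python) =====
-- def bigram_frequency_analyzer(text):
--     # Ignores the last character if it is a space (same trim as the original).
--     if text[-1] == " ":
--         text = text[:len(text)-1]
--     words = text.split(" ")
--     # One flat insertion-ordered dict keyed by (bigram-string, next-word): no nested lookups.
--     flat = {}
--     for i in range(2, len(words)):
--         key = (words[i-2] + " " + words[i-1], words[i])
--         flat[key] = flat.get(key, 0) + 1
--     # Distinct bigram strings in first-appearance order.
--     pairs = []
--     for (pair, _word) in flat:
--         if pair not in pairs:
--             pairs.append(pair)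
--     # Group-by formatting pass over the flat dict.
--     out = ""
--     for p in pairs:
--         out += p + " : "
--         for (q, w), n in flat.items():
--             if q == p:
--                 out += w + " (" + str(n) + ") "
--         out += "\n"
--     return out
-- ===== Notes on version B (the rewrite author's own statement) =====
-- stated objective: alternative
-- what changed: Replaces A's nested dict-of-dicts (conditional nested lookups and in-place increments) with one flat insertion-ordered counter keyed by (bigram-string, next-word), plus a separate group-by formatting pass that walks the distinct bigrams and filters the flat counter.
import Mathlib
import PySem

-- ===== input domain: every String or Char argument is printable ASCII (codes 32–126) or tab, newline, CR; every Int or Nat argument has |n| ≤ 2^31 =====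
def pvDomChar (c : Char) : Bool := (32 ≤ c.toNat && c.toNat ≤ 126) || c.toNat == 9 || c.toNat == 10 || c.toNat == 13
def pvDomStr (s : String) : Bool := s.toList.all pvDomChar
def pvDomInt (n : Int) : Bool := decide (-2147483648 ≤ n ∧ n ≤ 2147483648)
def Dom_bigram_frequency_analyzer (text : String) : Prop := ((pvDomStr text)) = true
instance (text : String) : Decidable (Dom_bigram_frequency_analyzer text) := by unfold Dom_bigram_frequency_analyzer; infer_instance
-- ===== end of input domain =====

-- B replaces A's nested dict-of-dicts with one flat insertion-ordered counter keyed by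
-- (bigram-string, next-word) plus a separate group-by formatting pass (objective: alternative).

-- ===== PORT A =====
def bigram_frequency_analyzer (text : String) : String :=
  let text := if PySem.Str.pyGet? text (-1) = some ' ' then
      PySem.Str.slice text none (some (PySem.Str.len text - 1)) else text
  let indivisualWords := (PySem.Str.split? text " ").getD []   -- sep " " ≠ "", so split? is always some
  let theDict : PySem.Dict String (PySem.Dict String Int) :=
    (PySem.List.pyRange 2 (indivisualWords.length) 1).foldl (fun theDict index =>
      let twoWords := ((PySem.List.pyGet? indivisualWords (index-2)).getD "") ++ " " ++
                      ((PySem.List.pyGet? indivisualWords (index-1)).getD "")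
      let currentWord := (PySem.List.pyGet? indivisualWords index).getD ""
      match theDict.get? twoWords with
      | some inner =>
        if inner.items ≠ [] then        -- Python truthiness of the nested dict
          match inner.get? currentWord with
          | some n =>
            if n ≠ 0 then               -- Python truthiness of the count
              theDict.insert twoWords (inner.insert currentWord (n+1))
            else theDict.insert twoWords (inner.insert currentWord 1)
          | none => theDict.insert twoWords (inner.insert currentWord 1)
        else theDict.insert twoWords (PySem.Dict.ofList [(currentWord, 1)])
      | none => theDict.insert twoWords (PySem.Dict.ofList [(currentWord, 1)])) PySem.Dict.empty
  theDict.keys.foldl (fun wordsAndNumbers key =>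
    let wordsAndNumbers := wordsAndNumbers ++ key ++ " : "
    let nestedDictionary := (theDict.get? key).getD PySem.Dict.empty   -- key ∈ keys: get? is always some
    let wordsAndNumbers := nestedDictionary.keys.foldl (fun acc nestedKey =>
      acc ++ nestedKey ++ " (" ++
        (match nestedDictionary.get? nestedKey with
         | some n => PySem.Int.toStr n
         | none => "None") ++ ") ") wordsAndNumbers    -- str(None) = "None" (unreachable branch)
    wordsAndNumbers ++ "\n") ""

-- ===== PORT B =====
def bigram_frequency_analyzer_alt (text : String) : String :=
  let text := if PySem.Str.pyGet? text (-1) = some ' ' then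
      PySem.Str.slice text none (some (PySem.Str.len text - 1)) else text
  let words := (PySem.Str.split? text " ").getD []   -- sep " " ≠ "", so split? is always some
  let flat : PySem.Dict (String × String) Int :=
    (PySem.List.pyRange 2 (words.length) 1).foldl (fun flat i =>
      let key := (((PySem.List.pyGet? words (i-2)).getD "") ++ " " ++
                  ((PySem.List.pyGet? words (i-1)).getD ""),
                  (PySem.List.pyGet? words i).getD "")
      flat.insert key (flat.getD key 0 + 1)) PySem.Dict.empty
  let pairs := flat.keys.foldl (fun pairs k => if k.1 ∈ pairs then pairs else pairs ++ [k.1])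
      ([] : List String)
  pairs.foldl (fun out p =>
    let out := out ++ p ++ " : "
    let out := flat.items.foldl (fun out kv =>
      if kv.1.1 == p then out ++ kv.1.2 ++ " (" ++ PySem.Int.toStr kv.2 ++ ") " else out) out
    out ++ "\n") ""

-- ===== PRECONDITION & SPEC =====
-- Pre_ excludes only the empty string, on which A raises IndexError at text[-1] (B raises too).
def Pre_bigram_frequency_analyzer (text : String) : Prop := text ≠ ""
instance (text : String) : Decidable (Pre_bigram_frequency_analyzer text) := by
  unfold Pre_bigram_frequency_analyzer; infer_instance
def pvWitness_bigram_frequency_analyzer : String := "a b a b a c"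
def Spec_bigram_frequency_analyzer (text : String) (out : String) : Prop := out = bigram_frequency_analyzer_alt text
instance (text : String) (out : String) : Decidable (Spec_bigram_frequency_analyzer text out) := by unfold Spec_bigram_frequency_analyzer; infer_instance

-- ===== CLAIM (what is proved, stated in full; the proofs are below) =====
def Claim_equal_bigram_frequency_analyzer : Prop := ∀ (text : String), Dom_bigram_frequency_analyzer text → Pre_bigram_frequency_analyzer text → Spec_bigram_frequency_analyzer text (bigram_frequency_analyzer text)

-- ===== LEMMAS AND PROOFS =====
theorem pv_foldl_cat (l : List String) (a : String) :
    List.foldl (· ++ ·) a l = a ++ List.foldl (· ++ ·) "" l := by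
  induction l generalizing a with
  | nil => simp
  | cons y ys ih =>
    simp only [List.foldl_cons]
    rw [ih (a ++ y), ih ("" ++ y)]
    simp [String.append_assoc]

theorem pv_foldl_str {α : Type} (l : List α) (f : α → String) (a : String) :
    List.foldl (fun acc x => acc ++ f x) a l = a ++ String.join (l.map f) := by
  rw [← List.foldl_map (g := (· ++ ·)) (f := f), String.join, pv_foldl_cat]

theorem pv_foldl_if_filter {α β : Type} (l : List α) (p : α → Bool) (g : β → α → β) (a : β) :
    List.foldl (fun acc x => if p x then g acc x else acc) a l = List.foldl g a (l.filter p) := by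
  induction l generalizing a with
  | nil => rfl
  | cons x xs ih => by_cases h : p x <;> simp [h, ih]

theorem pv_foldl_str_if {α : Type} (l : List α) (p : α → Bool) (f : α → String) (a : String) :
    List.foldl (fun acc x => if p x then acc ++ f x else acc) a l
      = a ++ String.join ((l.filter p).map f) := by
  rw [pv_foldl_if_filter, pv_foldl_str]

theorem pv_ofList_map {α β : Type} [BEq α] [LawfulBEq α] [BEq β] [LawfulBEq β]
    (xs : List α) (f : α → β) :
    PySem.Set.ofList ((PySem.Set.ofList xs).map f) = PySem.Set.ofList (xs.map f) := by
  induction xs using List.reverseRecOn with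
  | nil => rfl
  | append_singleton xs x ih =>
    rw [PySem.Set.ofList_append_singleton]
    by_cases h : x ∈ PySem.Set.ofList xs
    · rw [PySem.Set.add_of_mem h, ih, List.map_append]
      simp only [List.map_cons, List.map_nil]
      rw [PySem.Set.ofList_append_singleton,
        PySem.Set.add_of_mem (by rw [PySem.Set.mem_ofList]
                                 exact List.mem_map_of_mem ((PySem.Set.mem_ofList xs x).mp h))]
    · rw [PySem.Set.add_of_not_mem h, List.map_append, List.map_append]
      simp only [List.map_cons, List.map_nil]
      rw [PySem.Set.ofList_append_singleton, PySem.Set.ofList_append_singleton, ih]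
def pvPairs (es : List (String × String)) : List String := PySem.Set.ofList (es.map Prod.fst)
def pvGroup (es : List (String × String)) (p : String) : List (String × Int) :=
  ((PySem.Set.ofList es).filter (fun k => k.1 == p)).map (fun k => (k.2, (es.count k : Int)))
def pvNested (es : List (String × String)) : PySem.Dict String (PySem.Dict String Int) :=
  PySem.Dict.mk ((pvPairs es).map (fun p => (p, PySem.Dict.mk (pvGroup es p))))

-- keys of pvNested
theorem pv_nested_keys (es : List (String × String)) : (pvNested es).keys = pvPairs es := by
  simp only [pvNested, PySem.Dict.keys_mk, List.map_map]
  exact (List.map_congr_left (fun p _ => rfl)).trans (List.map_id _)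

theorem pv_group_empty_of_not_mem (es : List (String × String)) (p : String)
    (h : p ∉ es.map Prod.fst) : pvGroup es p = [] := by
  unfold pvGroup
  rw [List.map_eq_nil_iff, List.filter_eq_nil_iff]
  intro k hk
  have : k ∈ es := (PySem.Set.mem_ofList es k).mp hk
  simp only [beq_iff_eq]
  intro h1
  exact h (h1 ▸ List.mem_map_of_mem this)

theorem pv_group_ne_nil_of_mem (es : List (String × String)) (p : String)
    (h : p ∈ es.map Prod.fst) : pvGroup es p ≠ [] := by
  obtain ⟨k, hk, hk1⟩ := List.mem_map.mp h
  unfold pvGroup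
  intro hnil
  rw [List.map_eq_nil_iff, List.filter_eq_nil_iff] at hnil
  exact hnil k ((PySem.Set.mem_ofList es k).mpr hk) (by simp [hk1])

theorem pv_group_append_self_of_not_mem (es : List (String × String)) (e : String × String)
    (he : e ∉ es) : pvGroup (es ++ [e]) e.1 = pvGroup es e.1 ++ [(e.2, 1)] := by
  unfold pvGroup
  rw [PySem.Set.ofList_append_singleton, PySem.Set.add_of_not_mem
    (fun h => he ((PySem.Set.mem_ofList es e).mp h))]
  rw [List.filter_append, List.map_append]
  congr 1
  · apply List.map_congr_left
    intro k hk
    have hke : k ≠ e := fun h => he (h ▸ (PySem.Set.mem_ofList es k).mp (List.mem_filter.mp hk).1)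
    simp [List.count_append, Ne.symm hke]
  · simp [List.count_append, List.count_eq_zero.mpr he]

theorem pv_group_append_self_of_mem (es : List (String × String)) (e : String × String)
    (he : e ∈ es) : pvGroup (es ++ [e]) e.1
      = (pvGroup es e.1).map (fun kv => if kv.1 == e.2 then (e.2, (es.count e : Int) + 1) else kv) := by
  unfold pvGroup
  rw [PySem.Set.ofList_append_singleton, PySem.Set.add_of_mem ((PySem.Set.mem_ofList es e).mpr he)]
  rw [List.map_map]
  apply List.map_congr_left
  intro k hk
  have hk1 : k.1 = e.1 := by simpa using (List.mem_filter.mp hk).2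
  simp only [Function.comp]
  by_cases h2 : k.2 = e.2
  · have hke : k = e := Prod.ext hk1 h2
    subst hke
    simp [List.count_append]
  · have hke : k ≠ e := fun h => h2 (by rw [h])
    simp [h2, List.count_append, Ne.symm hke]

theorem pv_group_append_of_ne (es : List (String × String)) (e : String × String) (p : String)
    (hp : e.1 ≠ p) : pvGroup (es ++ [e]) p = pvGroup es p := by
  unfold pvGroup
  have hfil : (PySem.Set.ofList (es ++ [e])).filter (fun k => k.1 == p)
      = (PySem.Set.ofList es).filter (fun k => k.1 == p) := by
    rw [PySem.Set.ofList_append_singleton, PySem.Set.add_eq_ite]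
    by_cases h : e ∈ PySem.Set.ofList es
    · simp [h]
    · simp [h, List.filter_append, hp]
  rw [hfil]
  apply List.map_congr_left
  intro k hk
  have hk1 : k.1 = p := by simpa using (List.mem_filter.mp hk).2
  have hke : k ≠ e := fun h => hp (by rw [← h, hk1])
  have : (es ++ [e]).count k = es.count k := by
    simp [List.count_append, Ne.symm hke]
  rw [this]

-- inserting the updated inner dict for e.1 turns pvNested es into pvNested (es ++ [e]),
-- provided e.1 is already a key
theorem pv_insert_outer (es : List (String × String)) (e : String × String)
    (hq : e.1 ∈ es.map Prod.fst) :
    (pvNested es).insert e.1 (PySem.Dict.mk (pvGroup (es ++ [e]) e.1)) = pvNested (es ++ [e]) := by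
  have hqP : e.1 ∈ pvPairs es := (PySem.Set.mem_ofList _ _).mpr hq
  have hcon : (pvNested es).contains e.1 = true := by
    rw [PySem.Dict.contains_iff_mem_keys, pv_nested_keys]; exact hqP
  apply PySem.Dict.ext
  rw [PySem.Dict.items_insert_of_contains _ _ hcon]
  have hP' : pvPairs (es ++ [e]) = pvPairs es := by
    unfold pvPairs
    rw [List.map_append, List.map_cons, List.map_nil, PySem.Set.ofList_append_singleton]
    exact PySem.Set.add_of_mem hqP
  simp only [pvNested, hP', List.map_map]
  apply List.map_congr_left
  intro p hp
  simp only [Function.comp]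
  by_cases hpq : p = e.1
  · subst hpq; simp
  · simp only [show (p == e.1) = false from beq_eq_false_iff_ne.mpr hpq, if_neg Bool.false_ne_true]
    rw [pv_group_append_of_ne es e p (fun h => hpq h.symm)]

theorem pv_get?_mk_of_mem {α ν : Type} (S : List α) (key : α → String) (val : α → ν)
    (hnd : (S.map key).Nodup) {a : α} (ha : a ∈ S) :
    (PySem.Dict.mk (S.map (fun a => (key a, val a)))).get? (key a) = some (val a) := by
  apply PySem.Dict.get?_of_mem_items
  · exact List.mem_map_of_mem ha
  · simpa [PySem.Dict.keys_mk, Function.comp] using hnd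

theorem pv_get?_mk_of_not_mem {α ν : Type} (S : List α) (key : α → String) (val : α → ν)
    {x : String} (hx : x ∉ S.map key) :
    (PySem.Dict.mk (S.map (fun a => (key a, val a)))).get? x = none := by
  rw [PySem.Dict.get?_eq_none_iff_not_mem_keys]
  simpa [PySem.Dict.keys_mk, Function.comp] using hx

theorem pv_nodup_group_keys (es : List (String × String)) (p : String) :
    ((pvGroup es p).map Prod.fst).Nodup := by
  unfold pvGroup
  rw [List.map_map]
  apply List.Nodup.map_on
  · intro x hx y hy hxy
    have hx1 : x.1 = p := by simpa using (List.mem_filter.mp hx).2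
    have hy1 : y.1 = p := by simpa using (List.mem_filter.mp hy).2
    have : x.2 = y.2 := by simpa using hxy
    exact Prod.ext (hx1.trans hy1.symm) this
  · exact (PySem.Set.nodup_ofList es).filter _

theorem pv_nested_get?_of_mem (es : List (String × String)) {p : String}
    (hp : p ∈ pvPairs es) :
    (pvNested es).get? p = some (PySem.Dict.mk (pvGroup es p)) := by
  have := pv_get?_mk_of_mem (pvPairs es) (fun p => p) (fun p => PySem.Dict.mk (pvGroup es p))
    (by simp only [List.map_id', pvPairs]; exact PySem.Set.nodup_ofList _) hp
  simpa [pvNested] using this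

theorem pv_nested_get?_of_not_mem (es : List (String × String)) {p : String}
    (hp : p ∉ pvPairs es) :
    (pvNested es).get? p = none := by
  have := pv_get?_mk_of_not_mem (pvPairs es) (fun p => p) (fun p => PySem.Dict.mk (pvGroup es p))
    (x := p) (by simpa using hp)
  simpa [pvNested] using this

theorem pv_inner_get?_of_mem (es : List (String × String)) (e : String × String)
    (he : e ∈ es) :
    (PySem.Dict.mk (pvGroup es e.1)).get? e.2 = some ((es.count e : Int)) := by
  have hnd : (((PySem.Set.ofList es).filter (fun k => k.1 == e.1)).map (fun k => k.2)).Nodup := by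
    have := pv_nodup_group_keys es e.1
    unfold pvGroup at this
    simpa [List.map_map, Function.comp] using this
  have ha : e ∈ (PySem.Set.ofList es).filter (fun k => k.1 == e.1) :=
    List.mem_filter.mpr ⟨(PySem.Set.mem_ofList es e).mpr he, by simp⟩
  have := pv_get?_mk_of_mem ((PySem.Set.ofList es).filter (fun k => k.1 == e.1))
    (fun k => k.2) (fun k => (es.count k : Int)) hnd ha
  simpa [pvGroup] using this

theorem pv_inner_get?_of_not_mem (es : List (String × String)) (e : String × String)
    (he : e ∉ es) :
    (PySem.Dict.mk (pvGroup es e.1)).get? e.2 = none := by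
  have hx : e.2 ∉ ((PySem.Set.ofList es).filter (fun k => k.1 == e.1)).map (fun k => k.2) := by
    intro hmem
    obtain ⟨k, hk, hk2⟩ := List.mem_map.mp hmem
    have hk1 : k.1 = e.1 := by simpa using (List.mem_filter.mp hk).2
    have : k = e := Prod.ext hk1 hk2
    exact he (this ▸ (PySem.Set.mem_ofList es k).mp (List.mem_filter.mp hk).1)
  have := pv_get?_mk_of_not_mem ((PySem.Set.ofList es).filter (fun k => k.1 == e.1))
    (fun k => k.2) (fun k => (es.count k : Int)) hx
  simpa [pvGroup] using this

def pvStepA (d : PySem.Dict String (PySem.Dict String Int)) (e : String × String) :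
    PySem.Dict String (PySem.Dict String Int) :=
  match d.get? e.1 with
  | some inner =>
    if inner.items ≠ [] then
      match inner.get? e.2 with
      | some n =>
        if n ≠ 0 then d.insert e.1 (inner.insert e.2 (n+1))
        else d.insert e.1 (inner.insert e.2 1)
      | none => d.insert e.1 (inner.insert e.2 1)
    else d.insert e.1 (PySem.Dict.ofList [(e.2, 1)])
  | none => d.insert e.1 (PySem.Dict.ofList [(e.2, 1)])

theorem pv_nested_eq (es : List (String × String)) :
    es.foldl pvStepA PySem.Dict.empty = pvNested es := by
  induction es using List.reverseRecOn with
  | nil => rfl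
  | append_singleton es e ih =>
    rw [List.foldl_append, List.foldl_cons, List.foldl_nil, ih]
    by_cases hq : e.1 ∈ es.map Prod.fst
    · -- the bigram is already a key
      have hqP : e.1 ∈ pvPairs es := (PySem.Set.mem_ofList _ _).mpr hq
      have hget := pv_nested_get?_of_mem es hqP
      have hne : (PySem.Dict.mk (pvGroup es e.1)).items ≠ [] := by
        simpa using pv_group_ne_nil_of_mem es e.1 hq
      by_cases hee : e ∈ es
      · -- seen (pair, word) before: bump the count
        have hinner := pv_inner_get?_of_mem es e hee
        have hn0 : ((es.count e : Int)) ≠ 0 := by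
          have := List.count_pos_iff.mpr hee
          omega
        have hcon : (PySem.Dict.mk (pvGroup es e.1)).contains e.2 = true := by
          rw [PySem.Dict.contains_iff_mem_keys, PySem.Dict.keys_mk]
          exact List.mem_map.mpr ⟨(e.2, (es.count e : Int)),
            PySem.Dict.mem_items_of_get?_eq_some _ hinner, rfl⟩
        rw [show pvStepA (pvNested es) e
            = (pvNested es).insert e.1 ((PySem.Dict.mk (pvGroup es e.1)).insert e.2
                ((es.count e : Int) + 1)) by
          simp only [pvStepA, hget, hinner]
          simp only [ne_eq, if_neg (by simpa using hne), ite_not]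
          rw [if_neg hn0]]
        rw [show (PySem.Dict.mk (pvGroup es e.1)).insert e.2 ((es.count e : Int) + 1)
            = PySem.Dict.mk (pvGroup (es ++ [e]) e.1) by
          apply PySem.Dict.ext
          rw [PySem.Dict.items_insert_of_contains _ _ hcon,
            pv_group_append_self_of_mem es e hee]]
        exact pv_insert_outer es e hq
      · -- known bigram, new next-word
        have hinner := pv_inner_get?_of_not_mem es e hee
        have hcon : (PySem.Dict.mk (pvGroup es e.1)).contains e.2 = false := by
          rw [← PySem.Dict.get?_eq_none_iff_contains] at *
          exact hinner
        rw [show pvStepA (pvNested es) e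
            = (pvNested es).insert e.1 ((PySem.Dict.mk (pvGroup es e.1)).insert e.2 1) by
          simp [pvStepA, hget, hne, hinner]]
        rw [show (PySem.Dict.mk (pvGroup es e.1)).insert e.2 (1 : Int)
            = PySem.Dict.mk (pvGroup (es ++ [e]) e.1) by
          apply PySem.Dict.ext
          rw [PySem.Dict.items_insert_of_not_contains _ _ hcon,
            pv_group_append_self_of_not_mem es e hee]]
        exact pv_insert_outer es e hq
    · -- brand-new bigram
      have hqP : e.1 ∉ pvPairs es := fun h => hq ((PySem.Set.mem_ofList _ _).mp h)
      have hget := pv_nested_get?_of_not_mem es hqP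
      have hee : e ∉ es := fun h => hq (List.mem_map_of_mem h)
      rw [show pvStepA (pvNested es) e
          = (pvNested es).insert e.1 (PySem.Dict.ofList [(e.2, 1)]) by
        simp [pvStepA, hget]]
      have hcon : (pvNested es).contains e.1 = false := by
        rw [← PySem.Dict.get?_eq_none_iff_contains]
        exact hget
      apply PySem.Dict.ext
      rw [PySem.Dict.items_insert_of_not_contains _ _ hcon]
      have hP' : pvPairs (es ++ [e]) = pvPairs es ++ [e.1] := by
        unfold pvPairs
        rw [List.map_append, List.map_cons, List.map_nil, PySem.Set.ofList_append_singleton]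
        exact PySem.Set.add_of_not_mem hqP
      simp only [pvNested, hP', List.map_append, List.map_cons, List.map_nil]
      congr 1
      · apply List.map_congr_left
        intro p hp
        have hpq : e.1 ≠ p := fun h => hq (h ▸ (PySem.Set.mem_ofList _ _).mp hp)
        rw [pv_group_append_of_ne es e p hpq]
      · rw [pv_group_append_self_of_not_mem es e hee,
          pv_group_empty_of_not_mem es e.1 hq]
        rfl
def pvKeyOf (ws : List String) (i : Int) : String × String :=
  (((PySem.List.pyGet? ws (i-2)).getD "") ++ " " ++ ((PySem.List.pyGet? ws (i-1)).getD ""),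
   (PySem.List.pyGet? ws i).getD "")

def pvEvents (ws : List String) : List (String × String) :=
  (PySem.List.pyRange 2 ws.length 1).map (pvKeyOf ws)

def pvRenderKV (kv : String × Int) : String := kv.1 ++ " (" ++ PySem.Int.toStr kv.2 ++ ") "

def pvRender (es : List (String × String)) : String :=
  String.join ((pvPairs es).map (fun p =>
    p ++ " : " ++ String.join ((pvGroup es p).map pvRenderKV) ++ "\n"))

theorem pv_format_A (es : List (String × String)) :
    (pvNested es).keys.foldl (fun wordsAndNumbers key =>
      let wordsAndNumbers := wordsAndNumbers ++ key ++ " : "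
      let nestedDictionary := ((pvNested es).get? key).getD PySem.Dict.empty
      let wordsAndNumbers := nestedDictionary.keys.foldl (fun acc nestedKey =>
        acc ++ nestedKey ++ " (" ++
          (match nestedDictionary.get? nestedKey with
           | some n => PySem.Int.toStr n
           | none => "None") ++ ") ") wordsAndNumbers
      wordsAndNumbers ++ "\n") "" = pvRender es := by
  rw [pv_nested_keys]
  have hbody : ∀ (acc : String), ∀ key ∈ pvPairs es,
      (fun wordsAndNumbers key =>
        let wordsAndNumbers := wordsAndNumbers ++ key ++ " : "
        let nestedDictionary := ((pvNested es).get? key).getD PySem.Dict.empty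
        let wordsAndNumbers := nestedDictionary.keys.foldl (fun acc nestedKey =>
          acc ++ nestedKey ++ " (" ++
            (match nestedDictionary.get? nestedKey with
             | some n => PySem.Int.toStr n
             | none => "None") ++ ") ") wordsAndNumbers
        wordsAndNumbers ++ "\n") acc key
      = acc ++ (key ++ " : " ++ String.join ((pvGroup es key).map pvRenderKV) ++ "\n") := by
    intro acc key hkey
    simp only [pv_nested_get?_of_mem es hkey, Option.getD_some, PySem.Dict.keys_mk,
      List.foldl_map]
    have hinner : ∀ (acc2 : String), ∀ kv ∈ pvGroup es key,
        (fun acc2 kv =>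
          acc2 ++ kv.1 ++ " (" ++
            (match (PySem.Dict.mk (pvGroup es key)).get? kv.1 with
             | some n => PySem.Int.toStr n
             | none => "None") ++ ") ") acc2 kv
        = acc2 ++ pvRenderKV kv := by
      intro acc2 kv hkv
      have : (PySem.Dict.mk (pvGroup es key)).get? kv.1 = some kv.2 := by
        apply PySem.Dict.get?_of_mem_items _ (by exact hkv)
        rw [PySem.Dict.keys_mk]
        exact pv_nodup_group_keys es key
      simp only [this, pvRenderKV, String.append_assoc]
    rw [PySem.List.foldl_congr_mem _ _ _ _ hinner, pv_foldl_str]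
    simp [String.append_assoc]
  rw [PySem.List.foldl_congr_mem _ _ _ _ hbody, pv_foldl_str]
  simp [pvRender]

theorem pv_pairs_B (es : List (String × String)) :
    (PySem.Dict.counter es).keys.foldl
      (fun pairs k => if k.1 ∈ pairs then pairs else pairs ++ [k.1]) ([] : List String)
      = pvPairs es := by
  have hbody : ∀ (pairs : List String), ∀ k ∈ (PySem.Dict.counter es).keys,
      (if k.1 ∈ pairs then pairs else pairs ++ [k.1]) = PySem.Set.add pairs k.1 := by
    intro pairs k _
    rw [PySem.Set.add_eq_ite]
  rw [PySem.List.foldl_congr_mem _ _ _ _ hbody, ← PySem.Set.update_map_eq_foldl_add,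
    PySem.Set.update_nil_left, PySem.Dict.keys_counter, pv_ofList_map]
  rfl

theorem pv_format_B (es : List (String × String)) :
    (pvPairs es).foldl (fun out p =>
      let out := out ++ p ++ " : "
      let out := (PySem.Dict.counter es).items.foldl (fun out kv =>
        if kv.1.1 == p then out ++ kv.1.2 ++ " (" ++ PySem.Int.toStr kv.2 ++ ") " else out) out
      out ++ "\n") "" = pvRender es := by
  have hbody : ∀ (acc : String), ∀ p ∈ pvPairs es,
      (fun out p =>
        let out := out ++ p ++ " : "
        let out := (PySem.Dict.counter es).items.foldl (fun out kv =>
          if kv.1.1 == p then out ++ kv.1.2 ++ " (" ++ PySem.Int.toStr kv.2 ++ ") " else out) out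
        out ++ "\n") acc p
      = acc ++ (p ++ " : " ++ String.join ((pvGroup es p).map pvRenderKV) ++ "\n") := by
    intro acc p _
    have hre : ∀ (a : String), (PySem.Dict.counter es).items.foldl (fun out kv =>
        if kv.1.1 == p then out ++ kv.1.2 ++ " (" ++ PySem.Int.toStr kv.2 ++ ") " else out) a
        = a ++ String.join ((pvGroup es p).map pvRenderKV) := by
      intro a
      have := pv_foldl_str_if ((PySem.Dict.counter es).items)
        (fun kv => kv.1.1 == p)
        (fun kv => kv.1.2 ++ " (" ++ PySem.Int.toStr kv.2 ++ ") ") a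
      rw [show (fun (out : String) (kv : (String × String) × Int) =>
          if kv.1.1 == p then out ++ kv.1.2 ++ " (" ++ PySem.Int.toStr kv.2 ++ ") " else out)
        = (fun (out : String) kv =>
          if (fun (kv : (String × String) × Int) => kv.1.1 == p) kv
          then out ++ (fun (kv : (String × String) × Int) =>
            kv.1.2 ++ " (" ++ PySem.Int.toStr kv.2 ++ ") ") kv else out) from by
          funext out kv
          by_cases h : kv.1.1 == p <;> simp [h, String.append_assoc]]
      rw [this, PySem.Dict.items_counter, List.filter_map, List.map_map]
      congr 1
      simp only [pvGroup, List.map_map]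
      rfl
    simp only [hre]
    simp [String.append_assoc]
  rw [PySem.List.foldl_congr_mem _ _ _ _ hbody, pv_foldl_str]
  simp [pvRender]

theorem pv_loop_A (ws : List String) :
    (PySem.List.pyRange 2 ws.length 1).foldl (fun theDict index =>
        let twoWords := ((PySem.List.pyGet? ws (index-2)).getD "") ++ " " ++
                        ((PySem.List.pyGet? ws (index-1)).getD "")
        let currentWord := (PySem.List.pyGet? ws index).getD ""
        match theDict.get? twoWords with
        | some inner =>
          if inner.items ≠ [] then
            match inner.get? currentWord with
            | some n =>
              if n ≠ 0 then theDict.insert twoWords (inner.insert currentWord (n+1))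
              else theDict.insert twoWords (inner.insert currentWord 1)
            | none => theDict.insert twoWords (inner.insert currentWord 1)
          else theDict.insert twoWords (PySem.Dict.ofList [(currentWord, 1)])
        | none => theDict.insert twoWords (PySem.Dict.ofList [(currentWord, 1)]))
        (PySem.Dict.empty : PySem.Dict String (PySem.Dict String Int))
      = pvNested (pvEvents ws) := by
  rw [← pv_nested_eq, pvEvents, List.foldl_map]
  rfl

theorem pv_flat_eq (es : List (String × String)) :
    es.foldl (fun (flat : PySem.Dict (String × String) Int) key =>
        flat.insert key (flat.getD key 0 + 1)) PySem.Dict.empty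
      = PySem.Dict.counter es :=
  PySem.Dict.foldl_insert_getD_add_one_eq_counter es

theorem pv_loop_B (ws : List String) :
    (PySem.List.pyRange 2 ws.length 1).foldl (fun flat i =>
        let key := (((PySem.List.pyGet? ws (i-2)).getD "") ++ " " ++
                    ((PySem.List.pyGet? ws (i-1)).getD ""),
                    (PySem.List.pyGet? ws i).getD "")
        flat.insert key (flat.getD key 0 + 1))
        (PySem.Dict.empty : PySem.Dict (String × String) Int)
      = PySem.Dict.counter (pvEvents ws) := by
  rw [← pv_flat_eq, pvEvents, List.foldl_map]
  rfl
-- ===== VERDICT (by name: the statement is the Claim_ definition above) =====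
theorem bigram_frequency_analyzer_spec : Claim_equal_bigram_frequency_analyzer := by
  intro text _ _
  unfold Spec_bigram_frequency_analyzer
  unfold bigram_frequency_analyzer bigram_frequency_analyzer_alt
  simp only []
  rw [pv_loop_A, pv_loop_B, pv_pairs_B, pv_format_A, pv_format_B]
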